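-- pv_equiv track=rewrite | github.com/MannLabs/alphabase | alphabase/protein/fasta.py | get_candidate_sites
-- ===== SOURCE A (Python) =====
-- def get_candidate_sites(
--     sequence:str, target_mod_aas:str
-- )->list:
--     """get candidate modification sites
--
--     Parameters
--     ----------
--     sequence : str
--         peptide sequence
--
--     target_mod_aas : str
--         AAs that may have modifications
--
--     Returns
--     -------
--     list
--         candiadte mod sites in alphabase format (0: N-term, -1: C-term, 1-n:others)
--     """
--     candidate_sites = []
--     for i,aa in enumerate(sequence):
--         if aa in target_mod_aas:
--             candidate_sites.append(i+1) #alphabase mod sites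
--     return candidate_sites
-- ===== SOURCE B (Python) =====
-- def get_candidate_sites(
--     sequence:str, target_mod_aas:str
-- )->list:
--     """get candidate modification sites (per-target-character gathering)"""
--     sites = []
--     for c in dict.fromkeys(target_mod_aas):
--         sites.extend(i + 1 for i, a in enumerate(sequence) if a == c)
--     return sorted(sites)
-- ===== Notes on version B (the rewrite author's own statement) =====
-- stated objective: alternative
-- what changed: Instead of one left-to-right scan with a substring membership test per residue, B iterates over the deduplicated target characters, gathers each character's occurrence positions (+1) into one pool, and returns the pool sorted ascending.
import Mathlib
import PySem

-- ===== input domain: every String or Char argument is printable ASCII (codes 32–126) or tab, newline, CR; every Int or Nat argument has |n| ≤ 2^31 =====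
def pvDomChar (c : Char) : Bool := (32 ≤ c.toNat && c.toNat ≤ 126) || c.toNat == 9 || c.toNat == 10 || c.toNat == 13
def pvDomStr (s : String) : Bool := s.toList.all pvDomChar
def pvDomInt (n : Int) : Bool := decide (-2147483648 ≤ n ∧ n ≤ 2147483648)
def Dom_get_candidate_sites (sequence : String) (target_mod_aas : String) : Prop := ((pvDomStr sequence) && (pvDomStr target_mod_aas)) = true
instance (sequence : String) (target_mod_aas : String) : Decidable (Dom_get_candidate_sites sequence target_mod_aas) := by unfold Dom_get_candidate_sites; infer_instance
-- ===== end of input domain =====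

-- B replaces A's single scan with a membership test by per-distinct-target-character position gathering followed by an ascending sort (alternative decomposition, same result, not faster).


-- ===== PORT A =====
-- Literal port of A: one pass over enumerate(sequence); `aa in target_mod_aas`
-- is Python's substring test, ported exactly as PySem.Chars.isIn on the one-char string.
def get_candidate_sites (sequence : String) (target_mod_aas : String) : List Int :=
  (PySem.List.enumerate sequence.toList).foldl
    (fun candidate_sites p =>
      if PySem.Chars.isIn [p.2] target_mod_aas.toList then candidate_sites ++ [p.1 + 1]
      else candidate_sites) []

-- ===== PORT B =====
-- Port of B: per distinct target character (dict.fromkeys order = PySem.List.dedup),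
-- gather that character's positions (+1), then sort the pooled positions ascending.
def get_candidate_sites_alt (sequence : String) (target_mod_aas : String) : List Int :=
  let sites := (PySem.List.dedup target_mod_aas.toList).foldl
    (fun sites c =>
      sites ++ (PySem.List.enumerate sequence.toList).filterMap
        (fun p => if p.2 = c then some (p.1 + 1) else none)) []
  PySem.List.sorted sites (fun x => x) false

-- ===== PRECONDITION & SPEC =====
def Spec_get_candidate_sites (sequence : String) (target_mod_aas : String) (out : List Int) : Prop := out = get_candidate_sites_alt sequence target_mod_aas
instance (sequence : String) (target_mod_aas : String) (out : List Int) : Decidable (Spec_get_candidate_sites sequence target_mod_aas out) := by unfold Spec_get_candidate_sites; infer_instance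

-- ===== CLAIM (what is proved, stated in full; the proofs are below) =====
def Claim_equal_get_candidate_sites : Prop := ∀ (sequence : String) (target_mod_aas : String), Dom_get_candidate_sites sequence target_mod_aas → Spec_get_candidate_sites sequence target_mod_aas (get_candidate_sites sequence target_mod_aas)

-- ===== LEMMAS AND PROOFS =====
lemma filterMap_ite_eq_map_filter {a b : Type} (l : List a) (q : a -> Prop) [DecidablePred q] (f : a -> b) :
    l.filterMap (fun x => if q x then some (f x) else none)
      = (l.filter (fun x => decide (q x))).map f := by
  induction l with
  | nil => rfl
  | cons x xs ih => by_cases h : q x <;> simp [h, ih]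

lemma filter_split {a : Type} (l : List a) (q r : a -> Bool)
    (hdisj : forall x, x ∈ l -> q x = true -> r x = false) :
    (l.filter q ++ l.filter r).Perm (l.filter (fun x => q x || r x)) := by
  induction l with
  | nil => simp
  | cons x xs ih =>
    have ih' := ih (fun y hy => hdisj y (List.mem_cons_of_mem _ hy))
    by_cases hq : q x = true
    · rw [List.filter_cons_of_pos hq,
        List.filter_cons_of_neg (by simp [hdisj x List.mem_cons_self hq]),
        List.filter_cons_of_pos (by simp [hq])]
      exact ih'.cons x
    · have hq' : q x = false := by simpa using hq
      rw [List.filter_cons_of_neg (by simp [hq'])]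
      by_cases hr : r x = true
      · rw [List.filter_cons_of_pos hr, List.filter_cons_of_pos (by simp [hr])]
        exact List.perm_middle.trans (ih'.cons x)
      · have hr' : r x = false := by simpa using hr
        rw [List.filter_cons_of_neg (by simp [hr']), List.filter_cons_of_neg (by simp [hq', hr'])]
        exact ih'

lemma flatMap_filter_perm {a : Type} [DecidableEq a] {b : Type} (l : List (b × a)) (d : List a) (hd : d.Nodup) :
    (d.flatMap (fun c => l.filter (fun p => decide (p.2 = c)))).Perm
      (l.filter (fun p => decide (p.2 ∈ d))) := by
  induction d with
  | nil => simp
  | cons c d' ih =>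
    rcases List.nodup_cons.mp hd with ⟨hc, hd'⟩
    have step := filter_split l (fun p => decide (p.2 = c)) (fun p => decide (p.2 ∈ d'))
      (by intro p _ hp; simp at hp ⊢; simpa [hp] using hc)
    have : (l.filter (fun p => decide (p.2 = c) || decide (p.2 ∈ d')))
        = l.filter (fun p => decide (p.2 ∈ c :: d')) := by
      apply List.filter_congr; intro p _; simp [List.mem_cons]
    rw [List.flatMap_cons]
    exact (((ih hd').append_left _).trans step).trans (this ▸ List.Perm.refl _)

-- ===== VERDICT (by name: the statement is the Claim_ definition above) =====
lemma isIn_singleton_eq_mem (c : Char) (s : List Char) :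
    PySem.Chars.isIn [c] s = decide (c ∈ s) := by
  by_cases h : c ∈ s <;>
    simp [PySem.Chars.isIn_iff_infix, PySem.Chars.isIn_eq_false_iff, List.singleton_infix_iff, h]

-- ===== VERDICT (by name: the statement is the Claim_ definition above) =====
theorem get_candidate_sites_spec : Claim_equal_get_candidate_sites := by
  intro sequence target_mod_aas _
  unfold Spec_get_candidate_sites get_candidate_sites get_candidate_sites_alt
  rw [PySem.List.foldl_append_if, PySem.List.foldl_append_eq_flatMap]
  simp only [List.nil_append]
  set l := PySem.List.enumerate sequence.toList with hl
  set t := target_mod_aas.toList with ht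
  have hfe : l.filter (fun p => decide (p.2 ∈ PySem.List.dedup t))
      = l.filter (fun p => PySem.Chars.isIn [p.2] t) := by
    apply List.filter_congr
    intro p _
    rw [isIn_singleton_eq_mem]
    simp
  apply Eq.symm
  apply PySem.List.sorted_eq_of_perm_of_pairwise_lt
  · -- the gathered per-character positions are a rearrangement of A's left-to-right scan
    simp only [filterMap_ite_eq_map_filter, ← List.map_flatMap]
    exact ((hfe ▸ flatMap_filter_perm l (PySem.List.dedup t) (PySem.List.nodup_dedup t)).map _).symm
  · -- A's result is strictly increasing: indices in enumerate are, filter is a sublist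
    exact List.pairwise_map.mpr
      (((PySem.List.pairwise_lt_enumerate sequence.toList 0).sublist List.filter_sublist).imp
        (by intro a b h; omega))
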